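-- pv_equiv track=rewrite | github.com/arsaikia/Data_Structures_and_Algorithms | Data Structures and Algorithms/Python/Revision/Revision_Hard_1.py | stackDisks
-- ===== SOURCE A (Python) =====
-- def stackDisks(disks):
--     disks.sort(key=lambda disk: disk[2])
--     heights = [disk[2] for disk in disks]
--     sequence = [None for _ in disks]
--     maxHeightIdx = 0
--
--     for i in range(1, len(heights)):
--         currDisk = disks[i]
--         for j in range(0, i):
--             prevDisk = disks[j]
--             if canGoOnTop(prevDisk, currDisk):
--                 if heights[j] + currDisk[2] > heights[i]:
--                     heights[i] = heights[j] + currDisk[2]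
--                     sequence[i] = j
--         if heights[i] > heights[maxHeightIdx]:
--             maxHeightIdx = i
--     return buildHeightSequence(sequence, maxHeightIdx, disks)
--
-- def canGoOnTop(prev, curr):
--     return prev[0] < curr[0] and prev[1] < curr[1] and prev[2] < curr[2]
--
-- def buildHeightSequence(sequence, maxHeightIdx, disks):
--     seq = []
--     while maxHeightIdx is not None:
--         seq.append(disks[maxHeightIdx])
--         maxHeightIdx = sequence[maxHeightIdx]
--     return list(reversed(seq))
-- ===== SOURCE B (Python) =====
-- def stackDisks(disks):
--     disks.sort(key=lambda disk: disk[2])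
--     # memo entry per disk: (best stack height ending here, the disk, the best chain ending here)
--     memo = []
--     for disk in disks:
--         bh, bchain = 0, []
--         for h, d, c in memo:
--             if d[0] < disk[0] and d[1] < disk[1] and d[2] < disk[2] and h > bh:
--                 bh, bchain = h, c
--         memo.append((bh + disk[2], disk, bchain + [disk]))
--     return max(memo, key=lambda e: e[0])[2]
-- ===== Notes on version B (the rewrite author's own statement) =====
-- stated objective: alternative
-- what changed: Replaces A's index-based DP over parallel heights/sequence arrays plus pointer-chasing reconstruction (buildHeightSequence) with a single pass that memoizes, per disk, the pair (best height, best chain as an actual list), so the answer is read off directly with max(memo, key=height) and no predecessor array, no reconstruction loop and no final reversal.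
import Mathlib
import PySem

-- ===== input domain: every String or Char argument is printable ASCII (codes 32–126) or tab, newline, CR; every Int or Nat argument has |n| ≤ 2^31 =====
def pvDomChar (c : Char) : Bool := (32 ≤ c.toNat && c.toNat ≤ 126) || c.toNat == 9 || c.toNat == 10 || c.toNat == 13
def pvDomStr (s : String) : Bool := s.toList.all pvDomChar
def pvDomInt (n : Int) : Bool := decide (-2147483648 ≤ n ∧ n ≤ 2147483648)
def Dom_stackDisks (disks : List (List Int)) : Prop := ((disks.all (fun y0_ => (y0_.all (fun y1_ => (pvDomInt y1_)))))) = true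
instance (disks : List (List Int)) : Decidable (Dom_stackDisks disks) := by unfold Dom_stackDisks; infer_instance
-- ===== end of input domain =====

-- B replaces A's heights/predecessor-index arrays plus pointer-chasing reconstruction by one pass
-- memoizing (best height, disk, best chain as a list) per disk, reading the answer off with max(..., key).
-- Both Pythons sort `disks` in place; the equivalence proved here is about the return value.

-- ===== PORT A =====
-- disk[k] with a default; exact under Pre_ (every disk has length ≥ 3, only indices 0,1,2 are used)
def pyGetI (d : List Int) (k : Nat) : Int := d.getD k 0

def canGoOnTop (prev curr : List Int) : Bool :=
  decide (pyGetI prev 0 < pyGetI curr 0 ∧ pyGetI prev 1 < pyGetI curr 1 ∧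
          pyGetI prev 2 < pyGetI curr 2)

-- body of A's inner 'for j in range(0, i)' loop; state = (heights, sequence)
def innerA (ds : List (List Int)) (i : Nat) (st : List Int × List (Option Nat)) (j : Nat) :
    List Int × List (Option Nat) :=
  if canGoOnTop (ds.getD j []) (ds.getD i []) then
    if st.1.getD j 0 + pyGetI (ds.getD i []) 2 > st.1.getD i 0 then
      (st.1.set i (st.1.getD j 0 + pyGetI (ds.getD i []) 2), st.2.set i (some j))
    else st
  else st

-- body of A's outer 'for i in range(1, len(heights))' loop; state = (heights, sequence, maxHeightIdx)
def stepA (ds : List (List Int)) (st : List Int × List (Option Nat) × Nat) (i : Nat) :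
    List Int × List (Option Nat) × Nat :=
  let inner := (List.range i).foldl (innerA ds i) (st.1, st.2.1)
  (inner.1, inner.2, if inner.1.getD i 0 > inner.1.getD st.2.2 0 then i else st.2.2)

-- A's 'while maxHeightIdx is not None' loop; fuel = ds.length suffices since sequence[i] < i strictly
def buildHeightSequence (sequence : List (Option Nat)) (ds : List (List Int)) :
    Nat → Option Nat → List (List Int) → List (List Int)
  | 0, _, acc => acc.reverse
  | _+1, none, acc => acc.reverse
  | fuel+1, some idx, acc =>
      buildHeightSequence sequence ds fuel (sequence.getD idx none) (acc ++ [ds.getD idx []])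

def stackDisks (disks : List (List Int)) : List (List Int) :=
  let ds := PySem.List.sorted disks (fun disk => pyGetI disk 2)
  let heights := ds.map (fun disk => pyGetI disk 2)
  let sequence : List (Option Nat) := ds.map (fun _ => none)
  let st := (List.range' 1 (ds.length - 1)).foldl (stepA ds) (heights, sequence, 0)
  buildHeightSequence st.2.1 ds ds.length (some st.2.2) []

-- ===== PORT B =====
-- body of B's inner loop over memo entries e = (height, disk, chain); b = (best height, best chain)
def innerB (disk : List Int) (b : Int × List (List Int)) (e : Int × List Int × List (List Int)) :
    Int × List (List Int) :=
  if pyGetI e.2.1 0 < pyGetI disk 0 ∧ pyGetI e.2.1 1 < pyGetI disk 1 ∧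
     pyGetI e.2.1 2 < pyGetI disk 2 ∧ e.1 > b.1 then (e.1, e.2.2) else b

-- body of B's 'for disk in disks' loop
def stepB (memo : List (Int × List Int × List (List Int))) (disk : List Int) :
    List (Int × List Int × List (List Int)) :=
  let bb := memo.foldl (innerB disk) ((0 : Int), ([] : List (List Int)))
  memo ++ [(bb.1 + pyGetI disk 2, disk, bb.2 ++ [disk])]

def stackDisks_alt (disks : List (List Int)) : List (List Int) :=
  let ds := PySem.List.sorted disks (fun disk => pyGetI disk 2)
  let memo := ds.foldl stepB []
  match PySem.List.max? memo (fun e => e.1) with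
  | some e => e.2.2
  | none => []

-- ===== PRECONDITION & SPEC =====
-- Pre_ excludes exactly the inputs where the Python raises: the empty list (A's buildHeightSequence
-- indexes disks[0] → IndexError; B's max(...) → ValueError) and any disk of length < 3 (disk[2] → IndexError).
def Pre_stackDisks (disks : List (List Int)) : Prop :=
  disks ≠ [] ∧ ∀ d ∈ disks, 3 ≤ d.length
instance (disks : List (List Int)) : Decidable (Pre_stackDisks disks) := by
  unfold Pre_stackDisks; infer_instance

def pvWitness_stackDisks : List (List Int) := [[2, 2, 2], [1, 1, 1], [3, 3, 3]]

def Spec_stackDisks (disks : List (List Int)) (out : List (List Int)) : Prop := out = stackDisks_alt disks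
instance (disks : List (List Int)) (out : List (List Int)) : Decidable (Spec_stackDisks disks out) := by unfold Spec_stackDisks; infer_instance

-- ===== CLAIM (what is proved, stated in full; the proofs are below) =====
def Claim_equal_stackDisks : Prop := ∀ (disks : List (List Int)), Dom_stackDisks disks → Pre_stackDisks disks → Spec_stackDisks disks (stackDisks disks)

-- ===== LEMMAS AND PROOFS =====

-- B's full memo for a (sorted) list L, and per-index views of it
def memoOf (L : List (List Int)) : List (Int × List Int × List (List Int)) := L.foldl stepB []
def dE : Int × List Int × List (List Int) := (0, [], [])
def hsF (L : List (List Int)) (k : Nat) : Int := ((memoOf L).getD k dE).1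
def cF (L : List (List Int)) (k : Nat) : List (List Int) := ((memoOf L).getD k dE).2.2
def hOf (L : List (List Int)) (k : Nat) : Int := pyGetI (L.getD k []) 2
abbrev okOf (L : List (List Int)) (j k : Nat) : Prop := canGoOnTop (L.getD j []) (L.getD k []) = true
-- index-level version of both inner loops: running (best height, best predecessor index)
def pStep (L : List (List Int)) (k : Nat) (b : Int × Option Nat) (j : Nat) : Int × Option Nat :=
  if okOf L j k ∧ hsF L j > b.1 then (hsF L j, some j) else b
def pOf (L : List (List Int)) (k : Nat) : Int × Option Nat :=
  (List.range k).foldl (pStep L k) ((0 : Int), (none : Option Nat))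
def optChain (L : List (List Int)) : Option Nat → List (List Int)
  | none => []
  | some j => cF L j
def MOf (L : List (List Int)) (i : Nat) : List (Int × List Int × List (List Int)) :=
  (L.take i).foldl stepB []
def entryOf (L : List (List Int)) (i : Nat) : Int × List Int × List (List Int) :=
  let bb := (MOf L i).foldl (innerB (L.getD i [])) ((0 : Int), ([] : List (List Int)))
  (bb.1 + hOf L i, L.getD i [], bb.2 ++ [L.getD i []])
-- A's running maxHeightIdx after processing outer indices 1..i
def aOf (L : List (List Int)) (i : Nat) : Nat :=
  (List.range' 1 i).foldl (fun m k => if hsF L k > hsF L m then k else m) 0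
def AStOf (L : List (List Int)) (i : Nat) : List Int × List (Option Nat) × Nat :=
  (List.range' 1 i).foldl (stepA L) (L.map (fun d => pyGetI d 2), L.map (fun _ => none), 0)

-- generic pairing of two folds over the same list
theorem pvFoldlRel {α β γ : Type} (R : β → γ → Prop) (f : β → α → β) (g : γ → α → γ) :
    ∀ (l : List α) (b : β) (c : γ), R b c →
      (∀ b' c' a, a ∈ l → R b' c' → R (f b' a) (g c' a)) → R (l.foldl f b) (l.foldl g c)
  | [], _, _, h, _ => h
  | a :: t, b, c, h, hs =>
      pvFoldlRel R f g t (f b a) (g c a) (hs b c a List.mem_cons_self h)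
        (fun b' c' a' ha' hr => hs b' c' a' (List.mem_cons_of_mem _ ha') hr)

-- a fold over a list is a fold over its indices
theorem pvFoldlRange {α β : Type} (d : α) (f : β → α → β) :
    ∀ (L : List α) (b : β),
      L.foldl f b = (List.range L.length).foldl (fun b j => f b (L.getD j d)) b
  | [], _ => rfl
  | x :: t, b => by
      rw [List.foldl_cons, pvFoldlRange d f t (f b x), List.length_cons,
        List.range_succ_eq_map, List.foldl_cons, List.foldl_map]
      simp only [List.getD_cons_zero, List.getD_cons_succ]

theorem pvGetDSetSelf {α : Type} (l : List α) (i : Nat) (v d : α) (h : i < l.length) :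
    (l.set i v).getD i d = v := by
  simp [List.getD_eq_getElem?_getD, h]

theorem pvGetDSetNe {α : Type} (l : List α) (i k : Nat) (v d : α) (h : i ≠ k) :
    (l.set i v).getD k d = l.getD k d := by
  simp [List.getD_eq_getElem?_getD, List.getElem?_set_ne h]

theorem pvGetDMapLt {α β : Type} (l : List α) (f : α → β) (k : Nat) (d : β) (d' : α)
    (h : k < l.length) : (l.map f).getD k d = f (l.getD k d') := by
  simp [List.getD_eq_getElem?_getD, h]

theorem pvGetDMapGe {α β : Type} (l : List α) (f : α → β) (k : Nat) (d : β)
    (h : l.length ≤ k) : (l.map f).getD k d = d := by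
  simp [List.getD_eq_getElem?_getD, h]

theorem pvGetDGe {α : Type} (l : List α) (k : Nat) (d : α) (h : l.length ≤ k) :
    l.getD k d = d := by
  simp [List.getD_eq_getElem?_getD, h]

theorem MOf_succ (L : List (List Int)) (i : Nat) (h : i < L.length) :
    MOf L (i + 1) = MOf L i ++ [entryOf L i] := by
  unfold MOf entryOf
  rw [List.take_add_one, List.getElem?_eq_getElem h]
  simp only [Option.toList_some, List.foldl_append, List.foldl_cons, List.foldl_nil]
  rw [show L[i] = L.getD i [] from (List.getD_eq_getElem L [] h).symm]
  rfl

theorem MOf_length (L : List (List Int)) : ∀ i, i ≤ L.length → (MOf L i).length = i := by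
  intro i
  induction i with
  | zero => intro _; rfl
  | succ n ih =>
      intro h
      rw [MOf_succ L n (by omega)]
      simp [ih (by omega)]

theorem MOf_getD (L : List (List Int)) :
    ∀ i k, k < i → i ≤ L.length → (MOf L i).getD k dE = entryOf L k := by
  intro i
  induction i with
  | zero => intro k h _; omega
  | succ n ih =>
      intro k h hn
      rw [MOf_succ L n (by omega), List.getD_eq_getElem?_getD]
      by_cases hk : k < n
      · rw [List.getElem?_append_left (by rw [MOf_length L n (by omega)]; omega)]
        rw [← List.getD_eq_getElem?_getD]
        exact ih k hk (by omega)
      · have hkn : k = n := by omega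
        subst hkn
        have hlen := MOf_length L k (by omega)
        rw [List.getElem?_append_right (by simp [hlen]), hlen]
        simp

theorem memoOf_eq (L : List (List Int)) : memoOf L = MOf L L.length := by
  unfold memoOf MOf; rw [List.take_length]

theorem memoOf_getD (L : List (List Int)) (k : Nat) (h : k < L.length) :
    (memoOf L).getD k dE = entryOf L k := by
  rw [memoOf_eq]; exact MOf_getD L L.length k h le_rfl

-- B's inner fold over the memo equals the index-level fold pOf
theorem inner_eq (L : List (List Int)) (k : Nat) (hk : k ≤ L.length) :
    (MOf L k).foldl (innerB (L.getD k [])) ((0 : Int), ([] : List (List Int))) =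
      ((pOf L k).1, optChain L (pOf L k).2) := by
  rw [pvFoldlRange dE (innerB (L.getD k [])), MOf_length L k hk]
  refine pvFoldlRel
    (fun (b : Int × List (List Int)) (p : Int × Option Nat) => b = (p.1, optChain L p.2))
    (fun b j => innerB (L.getD k []) b ((MOf L k).getD j dE))
    (pStep L k) (List.range k) ((0 : Int), ([] : List (List Int)))
    ((0 : Int), (none : Option Nat)) rfl ?_
  intro b p j hj hbp
  have hjk : j < k := List.mem_range.mp hj
  have hjL : j < L.length := by omega
  have hmemo : (memoOf L).getD j dE = entryOf L j := memoOf_getD L j hjL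
  have hMj : (MOf L k).getD j dE = entryOf L j := MOf_getD L k j hjk hk
  have hEntry : entryOf L j = (hsF L j, L.getD j [], cF L j) := by
    unfold hsF cF; rw [hmemo]; rfl
  have hok : okOf L j k ↔
      (pyGetI (L.getD j []) 0 < pyGetI (L.getD k []) 0 ∧
       pyGetI (L.getD j []) 1 < pyGetI (L.getD k []) 1 ∧
       pyGetI (L.getD j []) 2 < pyGetI (L.getD k []) 2) := by
    unfold okOf canGoOnTop; simp
  subst hbp
  show innerB (L.getD k []) (p.1, optChain L p.2) ((MOf L k).getD j dE) =
    ((pStep L k p j).1, optChain L (pStep L k p j).2)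
  rw [hMj, hEntry]
  unfold innerB pStep
  split_ifs with hA hB hB'
  · rfl
  · exact absurd ⟨hok.mpr ⟨hA.1, hA.2.1, hA.2.2.1⟩, hA.2.2.2⟩ hB
  · exact absurd ⟨(hok.mp hB'.1).1, (hok.mp hB'.1).2.1, (hok.mp hB'.1).2.2, hB'.2⟩ hA
  · rfl

theorem hsF_eq (L : List (List Int)) (k : Nat) (h : k < L.length) :
    hsF L k = (pOf L k).1 + hOf L k := by
  unfold hsF
  rw [memoOf_getD L k h]
  unfold entryOf
  rw [inner_eq L k (by omega)]

theorem cF_eq (L : List (List Int)) (k : Nat) (h : k < L.length) :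
    cF L k = optChain L (pOf L k).2 ++ [L.getD k []] := by
  unfold cF
  rw [memoOf_getD L k h]
  unfold entryOf
  rw [inner_eq L k (by omega)]

theorem pOf_lt (L : List (List Int)) (k : Nat) : ∀ j, (pOf L k).2 = some j → j < k := by
  unfold pOf
  have aux : ∀ (l : List Nat) (b : Int × Option Nat),
      (∀ j, b.2 = some j → j < k) → (∀ j ∈ l, j < k) →
      ∀ j, ((l.foldl (pStep L k) b).2 = some j → j < k) := by
    intro l
    induction l with
    | nil => intro b hb _ j h; exact hb j h
    | cons x t ih =>
        intro b hb hl j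
        rw [List.foldl_cons]
        refine ih (pStep L k b x) ?_ (fun j hj => hl j (List.mem_cons_of_mem _ hj)) j
        intro j' hj'
        unfold pStep at hj'
        split at hj'
        · cases hj'; exact hl x List.mem_cons_self
        · exact hb j' hj'
  exact aux (List.range k) _ (by intro j h; cases h) (fun j hj => List.mem_range.mp hj)

theorem aOf_le (L : List (List Int)) (i : Nat) : aOf L i ≤ i := by
  unfold aOf
  have aux : ∀ (l : List Nat) (b : Nat), b ≤ i → (∀ x ∈ l, x ≤ i) →
      l.foldl (fun m k => if hsF L k > hsF L m then k else m) b ≤ i := by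
    intro l
    induction l with
    | nil => intro b hb _; exact hb
    | cons x t ih =>
        intro b hb hl
        rw [List.foldl_cons]
        refine ih _ ?_ (fun y hy => hl y (List.mem_cons_of_mem _ hy))
        split
        · exact hl x List.mem_cons_self
        · exact hb
  exact aux (List.range' 1 i) 0 (by omega)
    (fun x hx => by have := List.mem_range'_1.mp hx; omega)

theorem aOf_succ (L : List (List Int)) (i : Nat) :
    aOf L (i + 1) = if hsF L (i + 1) > hsF L (aOf L i) then i + 1 else aOf L i := by
  unfold aOf
  rw [List.range'_1_concat, List.foldl_append, List.foldl_cons, List.foldl_nil,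
    Nat.add_comm 1 i]

theorem buildLoop_none (sq : List (Option Nat)) (L : List (List Int)) :
    ∀ fuel acc, buildHeightSequence sq L fuel none acc = acc.reverse := by
  intro fuel acc; cases fuel <;> rfl

theorem build_chain (sq : List (Option Nat)) (L : List (List Int))
    (hsq : ∀ k, k < L.length → sq.getD k none = (pOf L k).2) :
    ∀ fuel k acc, k < L.length → k < fuel →
      buildHeightSequence sq L fuel (some k) acc = cF L k ++ acc.reverse := by
  intro fuel
  induction fuel with
  | zero => intro k acc _ h; omega
  | succ f ih =>
      intro k acc hkL hkf
      show buildHeightSequence sq L f (sq.getD k none) (acc ++ [L.getD k []]) = _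
      rw [hsq k hkL]
      rcases hp : (pOf L k).2 with _ | j
      · rw [buildLoop_none]
        rw [cF_eq L k hkL, hp]
        simp [optChain]
      · have hjk : j < k := pOf_lt L k j hp
        rw [ih j (acc ++ [L.getD k []]) (by omega) (by omega)]
        rw [cF_eq L k hkL, hp]
        simp [optChain]

-- A's inner loop: its effect on heights/sequence at outer index i
theorem innerA_fold (L : List (List Int)) (i : Nat) (hi : i < L.length)
    (hs : List Int) (sq : List (Option Nat))
    (hlh : hs.length = L.length) (hls : sq.length = L.length)
    (hbelow : ∀ k, k < i → hs.getD k 0 = hsF L k)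
    (hself : hs.getD i 0 = hOf L i) (hsqi : sq.getD i none = none) :
    ((List.range i).foldl (innerA L i) (hs, sq)).1.length = L.length ∧
    ((List.range i).foldl (innerA L i) (hs, sq)).2.length = L.length ∧
    (∀ k, k ≠ i → ((List.range i).foldl (innerA L i) (hs, sq)).1.getD k 0 = hs.getD k 0) ∧
    ((List.range i).foldl (innerA L i) (hs, sq)).1.getD i 0 = (pOf L i).1 + hOf L i ∧
    (∀ k, k ≠ i → ((List.range i).foldl (innerA L i) (hs, sq)).2.getD k none = sq.getD k none) ∧
    ((List.range i).foldl (innerA L i) (hs, sq)).2.getD i none = (pOf L i).2 := by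
  refine pvFoldlRel
    (fun (b : List Int × List (Option Nat)) (p : Int × Option Nat) =>
      b.1.length = L.length ∧ b.2.length = L.length ∧
      (∀ k, k ≠ i → b.1.getD k 0 = hs.getD k 0) ∧ b.1.getD i 0 = p.1 + hOf L i ∧
      (∀ k, k ≠ i → b.2.getD k none = sq.getD k none) ∧ b.2.getD i none = p.2)
    (innerA L i) (pStep L i) (List.range i) (hs, sq) ((0 : Int), (none : Option Nat))
    ⟨hlh, hls, fun _ _ => rfl, by rw [hself]; ring, fun _ _ => rfl, hsqi⟩ ?_
  intro b p j hj hbp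
  obtain ⟨b1, b2, b3, b4, b5, b6⟩ := hbp
  have hjlt : j < i := List.mem_range.mp hj
  have hbj : b.1.getD j 0 = hsF L j := by
    rw [b3 j (by omega)]; exact hbelow j hjlt
  have hpy : pyGetI (L.getD i []) 2 = hOf L i := rfl
  unfold innerA pStep
  by_cases hok : canGoOnTop (L.getD j []) (L.getD i []) = true
  · rw [if_pos hok]
    by_cases hgt : hsF L j > p.1
    · have hcond : b.1.getD j 0 + pyGetI (L.getD i []) 2 > b.1.getD i 0 := by
        rw [hpy, hbj, b4]; omega
      rw [if_pos hcond, if_pos ((⟨hok, hgt⟩ : okOf L j i ∧ hsF L j > p.1))]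
      refine ⟨by simp [b1], by simp [b2], ?_, ?_, ?_, ?_⟩
      · intro k hk
        rw [pvGetDSetNe _ _ _ _ _ (fun h => hk h.symm)]
        exact b3 k hk
      · rw [pvGetDSetSelf _ _ _ _ (by rw [b1]; exact hi), hpy, hbj]
      · intro k hk
        rw [pvGetDSetNe _ _ _ _ _ (fun h => hk h.symm)]
        exact b5 k hk
      · rw [pvGetDSetSelf _ _ _ _ (by rw [b2]; exact hi)]
    · have hcond : ¬(b.1.getD j 0 + pyGetI (L.getD i []) 2 > b.1.getD i 0) := by
        rw [hpy, hbj, b4]; omega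
      rw [if_neg hcond, if_neg ((fun hc => hgt hc.2 : ¬(okOf L j i ∧ hsF L j > p.1)))]
      exact ⟨b1, b2, b3, b4, b5, b6⟩
  · rw [if_neg hok, if_neg ((fun hc => hok hc.1 : ¬(okOf L j i ∧ hsF L j > p.1)))]
    exact ⟨b1, b2, b3, b4, b5, b6⟩

-- the outer-loop invariant of A, stated against B's final memo
theorem A_inv (L : List (List Int)) (hn : 1 ≤ L.length) :
    ∀ i, i ≤ L.length - 1 →
      (AStOf L i).1.length = L.length ∧ (AStOf L i).2.1.length = L.length ∧
      (∀ k, k ≤ i → (AStOf L i).1.getD k 0 = hsF L k) ∧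
      (∀ k, i < k → (AStOf L i).1.getD k 0 = hOf L k) ∧
      (∀ k, k ≤ i → (AStOf L i).2.1.getD k none = (pOf L k).2) ∧
      (∀ k, i < k → (AStOf L i).2.1.getD k none = none) ∧
      (AStOf L i).2.2 = aOf L i := by
  intro i
  induction i with
  | zero =>
      intro _
      have h0 : AStOf L 0 = (L.map (fun d => pyGetI d 2), L.map (fun _ => none), 0) := rfl
      rw [h0]
      refine ⟨by simp, by simp, ?_, ?_, ?_, ?_, rfl⟩
      · intro k hk
        have hk0 : k = 0 := by omega
        subst hk0
        rw [pvGetDMapLt L _ 0 0 [] (by omega), hsF_eq L 0 (by omega)]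
        have : (pOf L 0).1 = 0 := rfl
        rw [this]
        show hOf L 0 = 0 + hOf L 0
        ring
      · intro k _
        by_cases hkL : k < L.length
        · rw [pvGetDMapLt L _ k 0 [] hkL]; rfl
        · rw [pvGetDMapGe L _ k 0 (by omega)]
          unfold hOf
          rw [pvGetDGe L k [] (by omega)]
          rfl
      · intro k hk
        have hk0 : k = 0 := by omega
        subst hk0
        rw [pvGetDMapLt L _ 0 none [] (by omega)]
        rfl
      · intro k _
        by_cases hkL : k < L.length
        · rw [pvGetDMapLt L _ k none [] hkL]
        · rw [pvGetDMapGe L _ k none (by omega)]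
  | succ i ih =>
      intro hi
      obtain ⟨h1, h2, h3, h4, h5, h6, h7⟩ := ih (by omega)
      have hstep : AStOf L (i + 1) = stepA L (AStOf L i) (i + 1) := by
        unfold AStOf
        rw [List.range'_1_concat, List.foldl_append, List.foldl_cons, List.foldl_nil,
          Nat.add_comm 1 i]
      have hiL : i + 1 < L.length := by omega
      obtain ⟨r1, r2, r3, r4, r5, r6⟩ :=
        innerA_fold L (i + 1) hiL (AStOf L i).1 (AStOf L i).2.1 h1 h2
          (fun k hk => h3 k (by omega)) (h4 (i + 1) (by omega)) (h6 (i + 1) (by omega))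
      have hres : AStOf L (i + 1) =
          (((List.range (i + 1)).foldl (innerA L (i + 1)) ((AStOf L i).1, (AStOf L i).2.1)).1,
           ((List.range (i + 1)).foldl (innerA L (i + 1)) ((AStOf L i).1, (AStOf L i).2.1)).2,
           if ((List.range (i + 1)).foldl (innerA L (i + 1)) ((AStOf L i).1, (AStOf L i).2.1)).1.getD (i + 1) 0 >
              ((List.range (i + 1)).foldl (innerA L (i + 1)) ((AStOf L i).1, (AStOf L i).2.1)).1.getD (AStOf L i).2.2 0
           then i + 1 else (AStOf L i).2.2) := by
        rw [hstep]; rfl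
      have hgeti : ((List.range (i + 1)).foldl (innerA L (i + 1)) ((AStOf L i).1, (AStOf L i).2.1)).1.getD (i + 1) 0 = hsF L (i + 1) := by
        rw [r4, ← hsF_eq L (i + 1) hiL]
      have hgetm : ((List.range (i + 1)).foldl (innerA L (i + 1)) ((AStOf L i).1, (AStOf L i).2.1)).1.getD (AStOf L i).2.2 0 = hsF L (aOf L i) := by
        have hma : aOf L i ≤ i := aOf_le L i
        rw [h7, r3 (aOf L i) (by omega)]
        exact h3 (aOf L i) hma
      rw [hres]
      refine ⟨r1, r2, ?_, ?_, ?_, ?_, ?_⟩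
      · intro k hk
        by_cases hki : k = i + 1
        · subst hki; exact hgeti
        · rw [r3 k hki]; exact h3 k (by omega)
      · intro k hk
        rw [r3 k (by omega)]
        exact h4 k (by omega)
      · intro k hk
        by_cases hki : k = i + 1
        · subst hki; exact r6
        · rw [r5 k hki]; exact h5 k (by omega)
      · intro k hk
        rw [r5 k (by omega)]
        exact h6 k (by omega)
      · show (if _ > _ then i + 1 else (AStOf L i).2.2) = aOf L (i + 1)
        rw [hgeti, hgetm, h7, aOf_succ]

-- B's max(memo, key=height) picks the entry at A's final maxHeightIdx
theorem max_lemma (L : List (List Int)) (hn : 1 ≤ L.length) :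
    PySem.List.max? (memoOf L) (fun e => e.1) =
      some ((memoOf L).getD (aOf L (L.length - 1)) dE) := by
  have hlen : (memoOf L).length = L.length := by
    rw [memoOf_eq]; exact MOf_length L _ le_rfl
  obtain ⟨x, t, hxt⟩ := List.exists_cons_of_ne_nil
    (show memoOf L ≠ [] by intro h; rw [h] at hlen; simp at hlen; omega)
  have htlen : t.length = L.length - 1 := by
    rw [hxt] at hlen; simp at hlen; omega
  have hx : (memoOf L).getD 0 dE = x := by rw [hxt]; rfl
  have ht : ∀ j, t.getD j dE = (memoOf L).getD (j + 1) dE := by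
    intro j; rw [hxt]; rfl
  unfold PySem.List.max?
  conv_lhs => rw [hxt]
  rw [List.foldl_cons]
  rw [pvFoldlRange dE _ t, htlen]
  have haOf : aOf L (L.length - 1) =
      (List.range (L.length - 1)).foldl
        (fun m j => if hsF L (1 + j) > hsF L m then 1 + j else m) 0 := by
    unfold aOf
    rw [List.range'_eq_map_range, List.foldl_map]
  rw [haOf]
  refine (pvFoldlRel
    (fun (acc : Option (Int × List Int × List (List Int))) (m : Nat) =>
      m < L.length ∧ acc = some ((memoOf L).getD m dE))
    _ _ (List.range (L.length - 1)) (some x) 0 ⟨by omega, by rw [hx]⟩ ?_).2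
  intro acc m j hj hram
  obtain ⟨hmlt, hacc⟩ := hram
  have hjlt : j < L.length - 1 := List.mem_range.mp hj
  rw [hacc, ht j]
  have hkeym : ((memoOf L).getD m dE).1 = hsF L m := rfl
  have hkeyj : ((memoOf L).getD (j + 1) dE).1 = hsF L (j + 1) := rfl
  have h1j : 1 + j = j + 1 := by omega
  rw [h1j]
  constructor
  · show (if hsF L (j + 1) > hsF L m then j + 1 else m) < L.length
    split <;> omega
  · show (if ((memoOf L).getD m dE).1 < ((memoOf L).getD (j + 1) dE).1
        then some ((memoOf L).getD (j + 1) dE) else some ((memoOf L).getD m dE)) =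
      some ((memoOf L).getD (if hsF L (j + 1) > hsF L m then j + 1 else m) dE)
    rw [hkeym, hkeyj]
    simp only [gt_iff_lt]
    split <;> rfl

-- the two ports agree for any (sorted) list L
theorem main_eq (L : List (List Int)) (hn : 1 ≤ L.length) :
    buildHeightSequence (AStOf L (L.length - 1)).2.1 L L.length
      (some (AStOf L (L.length - 1)).2.2) [] =
    (match PySem.List.max? (L.foldl stepB []) (fun e => e.1) with
     | some e => e.2.2
     | none => []) := by
  obtain ⟨_, _, _, _, h5, _, h7⟩ := A_inv L hn (L.length - 1) le_rfl
  have hsq : ∀ k, k < L.length → (AStOf L (L.length - 1)).2.1.getD k none = (pOf L k).2 :=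
    fun k hk => h5 k (by omega)
  have hmlt : aOf L (L.length - 1) < L.length :=
    lt_of_le_of_lt (aOf_le L (L.length - 1)) (by omega)
  rw [h7, build_chain (AStOf L (L.length - 1)).2.1 L hsq L.length (aOf L (L.length - 1)) []
    hmlt (by omega)]
  rw [show L.foldl stepB [] = memoOf L from rfl, max_lemma L hn]
  simp [cF]

-- ===== VERDICT (by name: the statement is the Claim_ definition above) =====
theorem stackDisks_spec : Claim_equal_stackDisks := by
  intro disks _ hpre
  unfold Spec_stackDisks
  have hn : 1 ≤ (PySem.List.sorted disks (fun disk => pyGetI disk 2)).length := by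
    rw [PySem.List.length_sorted]
    have := hpre.1
    cases disks with
    | nil => exact absurd rfl this
    | cons a l => simp
  exact main_eq (PySem.List.sorted disks (fun disk => pyGetI disk 2)) hn
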